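-- pv_equiv track=rewrite | github.com/TheIgorMC/mysite | site01/app/archery_utils.py | calculate_medal_count
-- ===== SOURCE A (Python) =====
-- from typing import Dict, List, Optional
--
-- def calculate_medal_count(results: List[Dict]) -> Dict:
--     """Calculate medal distribution from results"""
--     medals = {
--         'gold': 0,
--         'silver': 0,
--         'bronze': 0,
--         'total': 0
--     }
--
--     for result in results:
--         position = result.get('position')
--         if position == 1:
--             medals['gold'] += 1
--         elif position == 2:
--             medals['silver'] += 1
--         elif position == 3:
--             medals['bronze'] += 1
--
--     medals['total'] = len(results)
--
--     return medals
-- ===== SOURCE B (Python) =====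
-- def calculate_medal_count(results):
--     """Calculate medal distribution from results (aggregate positions, then project)."""
--     positions = [r.get('position') for r in results]
--     return {
--         'gold': positions.count(1),
--         'silver': positions.count(2),
--         'bronze': positions.count(3),
--         'total': len(results),
--     }
-- ===== Notes on version B (the rewrite author's own statement) =====
-- stated objective: simpler
-- what changed: Replaces the per-element if/elif counting loop mutating a dict with one projection pass collecting positions and list.count per medal, building the result dict in a single literal.
import Mathlib
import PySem

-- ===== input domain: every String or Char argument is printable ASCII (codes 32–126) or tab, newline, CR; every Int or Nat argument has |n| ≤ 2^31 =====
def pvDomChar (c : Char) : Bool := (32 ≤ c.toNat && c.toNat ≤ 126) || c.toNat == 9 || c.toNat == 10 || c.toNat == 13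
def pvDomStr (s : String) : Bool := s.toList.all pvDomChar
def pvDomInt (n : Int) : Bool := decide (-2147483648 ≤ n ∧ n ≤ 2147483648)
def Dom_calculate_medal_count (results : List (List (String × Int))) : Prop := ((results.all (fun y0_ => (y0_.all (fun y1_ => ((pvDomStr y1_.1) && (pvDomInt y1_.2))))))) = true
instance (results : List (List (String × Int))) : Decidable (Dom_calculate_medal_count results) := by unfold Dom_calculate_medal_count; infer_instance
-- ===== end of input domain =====

-- B replaces A's if/elif counting loop with one projection pass and a count per medal; objective: simpler.

-- ===== PORT A =====
-- literal transliteration of A: a medals dict, a loop incrementing via if/elif, then total = len(results)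
def calculate_medal_count (results : List (List (String × Int))) : List (String × Int) :=
  let medals : PySem.Dict String Int :=
    PySem.Dict.ofList [("gold", 0), ("silver", 0), ("bronze", 0), ("total", 0)]
  let medals := results.foldl (fun m r =>
    let position := (PySem.Dict.mk r).get? "position"
    if position == some 1 then m.modify "gold" 0 (· + 1)
    else if position == some 2 then m.modify "silver" 0 (· + 1)
    else if position == some 3 then m.modify "bronze" 0 (· + 1)
    else m) medals
  (medals.insert "total" (results.length : Int)).items

-- ===== PORT B =====
def calculate_medal_count_alt (results : List (List (String × Int))) : List (String × Int) :=
  let positions := results.map (fun r => (PySem.Dict.mk r).get? "position")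
  [("gold", (positions.count (some 1) : Int)),
   ("silver", (positions.count (some 2) : Int)),
   ("bronze", (positions.count (some 3) : Int)),
   ("total", (results.length : Int))]

-- ===== PRECONDITION & SPEC =====
def Spec_calculate_medal_count (results : List (List (String × Int))) (out : List (String × Int)) : Prop := out = calculate_medal_count_alt results
instance (results : List (List (String × Int))) (out : List (String × Int)) : Decidable (Spec_calculate_medal_count results out) := by unfold Spec_calculate_medal_count; infer_instance

-- ===== CLAIM (what is proved, stated in full; the proofs are below) =====
def Claim_equal_calculate_medal_count : Prop := ∀ (results : List (List (String × Int))), Dom_calculate_medal_count results → Spec_calculate_medal_count results (calculate_medal_count results)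

-- ===== LEMMAS AND PROOFS =====

-- A's loop over a 4-key literal dict, characterised by the running gold/silver/bronze counts.
theorem medal_loop (rs : List (List (String × Int))) (g s b t : Int) :
    rs.foldl (fun m r =>
      let position := (PySem.Dict.mk r).get? "position"
      if position == some 1 then m.modify "gold" 0 (· + 1)
      else if position == some 2 then m.modify "silver" 0 (· + 1)
      else if position == some 3 then m.modify "bronze" 0 (· + 1)
      else m)
      (PySem.Dict.mk [("gold", g), ("silver", s), ("bronze", b), ("total", t)])
    = PySem.Dict.mk
        [("gold", g + ((rs.map (fun r => (PySem.Dict.mk r).get? "position")).count (some 1) : Int)),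
         ("silver", s + ((rs.map (fun r => (PySem.Dict.mk r).get? "position")).count (some 2) : Int)),
         ("bronze", b + ((rs.map (fun r => (PySem.Dict.mk r).get? "position")).count (some 3) : Int)),
         ("total", t)] := by
  induction rs generalizing g s b t with
  | nil => simp
  | cons r rs ih =>
    simp only [List.foldl_cons, List.map_cons, List.count_cons]
    by_cases h1 : (PySem.Dict.mk r).get? "position" = some 1
    · rw [if_pos (by simp [h1])]
      have : (PySem.Dict.mk [("gold", g), ("silver", s), ("bronze", b), ("total", t)]).modify "gold" 0 (· + 1)
          = PySem.Dict.mk [("gold", g + 1), ("silver", s), ("bronze", b), ("total", t)] := by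
        simp [PySem.Dict.modify, PySem.Dict.getD, PySem.Dict.get?, PySem.Dict.contains, PySem.Dict.insert]
      rw [this, ih]
      simp [h1]
      ring
    · by_cases h2 : (PySem.Dict.mk r).get? "position" = some 2
      · rw [if_neg (by simp [h1]), if_pos (by simp [h2])]
        have : (PySem.Dict.mk [("gold", g), ("silver", s), ("bronze", b), ("total", t)]).modify "silver" 0 (· + 1)
            = PySem.Dict.mk [("gold", g), ("silver", s + 1), ("bronze", b), ("total", t)] := by
          simp [PySem.Dict.modify, PySem.Dict.getD, PySem.Dict.get?, PySem.Dict.contains, PySem.Dict.insert]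
        rw [this, ih]
        simp [h2]
        ring
      · by_cases h3 : (PySem.Dict.mk r).get? "position" = some 3
        · rw [if_neg (by simp [h1]), if_neg (by simp [h2]), if_pos (by simp [h3])]
          have : (PySem.Dict.mk [("gold", g), ("silver", s), ("bronze", b), ("total", t)]).modify "bronze" 0 (· + 1)
              = PySem.Dict.mk [("gold", g), ("silver", s), ("bronze", b + 1), ("total", t)] := by
            simp [PySem.Dict.modify, PySem.Dict.getD, PySem.Dict.get?, PySem.Dict.contains, PySem.Dict.insert]
          rw [this, ih]
          simp [h3]
          ring
        · rw [if_neg (by simp [h1]), if_neg (by simp [h2]), if_neg (by simp [h3]), ih]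
          simp [h1, h2, h3]

-- ===== VERDICT (by name: the statement is the Claim_ definition above) =====
theorem calculate_medal_count_spec : Claim_equal_calculate_medal_count := by
  intro results _
  show _ = _
  simp only [calculate_medal_count, calculate_medal_count_alt]
  rw [show PySem.Dict.ofList [("gold", (0:Int)), ("silver", 0), ("bronze", 0), ("total", 0)]
      = PySem.Dict.mk [("gold", 0), ("silver", 0), ("bronze", 0), ("total", 0)] from by decide]
  rw [medal_loop]
  simp [PySem.Dict.insert, PySem.Dict.contains]
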